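-- pv_equiv track=rewrite | github.com/GregMengelkamp/adb_pull-a-lot | adb_pull_everything.py | filter_for_paths
-- ===== SOURCE A (Python) =====
-- def filter_for_paths(filters, paths):
--     if not filters:
--         return paths
--
--     def filter_in_path(name):
--         for filter in filters:
--             if filter in name:
--                 return True
--         return False
--
--     paths = [path for path in paths if not filter_in_path(path)]
--
--     return paths
-- ===== SOURCE B (Python) =====
-- def filter_for_paths(filters, paths):
--     # Filter-major staged passes: each filter prunes the surviving paths in turn,
--     # so later (cheaper) passes run only on paths no earlier filter matched.
--     remaining = list(paths)
--     for f in filters: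
--         remaining = [p for p in remaining if f not in p]
--     return remaining
-- ===== Notes on version B (the rewrite author's own statement) =====
-- stated objective: alternative
-- what changed: A scans path-major (one pass over paths, testing every filter inside each path); B inverts the loop nesting into filter-major staged passes, each filter pruning the list of surviving paths in turn, with the proof that the traversal order does not change the result.
import Mathlib
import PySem

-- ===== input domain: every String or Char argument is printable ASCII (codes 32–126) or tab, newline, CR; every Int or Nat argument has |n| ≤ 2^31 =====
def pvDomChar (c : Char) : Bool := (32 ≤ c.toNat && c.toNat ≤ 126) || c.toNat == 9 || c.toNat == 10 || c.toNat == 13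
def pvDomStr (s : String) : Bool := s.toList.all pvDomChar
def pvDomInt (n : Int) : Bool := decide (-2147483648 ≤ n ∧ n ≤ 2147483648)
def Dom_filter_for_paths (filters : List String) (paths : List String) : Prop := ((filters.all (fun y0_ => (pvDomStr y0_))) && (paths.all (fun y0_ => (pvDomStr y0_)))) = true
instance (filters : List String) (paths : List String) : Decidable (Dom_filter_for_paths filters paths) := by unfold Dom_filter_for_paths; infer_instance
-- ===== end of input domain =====

-- B inverts A's loop nesting (filter-major staged passes instead of path-major); return values proved equal on Dom.

-- ===== PORT A =====
-- filter_in_path: 'for filter in filters: if filter in name: return True / return False'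
def pvFilterInPath (filters : List String) (name : String) : Bool :=
  filters.any (fun f => PySem.Str.isIn f name)

def filter_for_paths (filters : List String) (paths : List String) : List String :=
  if filters = [] then paths
  else paths.filter (fun path => !(pvFilterInPath filters path))

-- ===== PORT B =====
-- 'for f in filters: remaining = [p for p in remaining if f not in p]'
def filter_for_paths_alt (filters : List String) (paths : List String) : List String :=
  filters.foldl (fun remaining f => remaining.filter (fun p => !(PySem.Str.isIn f p))) paths

-- ===== PRECONDITION & SPEC =====
def Spec_filter_for_paths (filters : List String) (paths : List String) (out : List String) : Prop := out = filter_for_paths_alt filters paths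
instance (filters : List String) (paths : List String) (out : List String) : Decidable (Spec_filter_for_paths filters paths out) := by unfold Spec_filter_for_paths; infer_instance

-- ===== CLAIM (what is proved, stated in full; the proofs are below) =====
def Claim_equal_filter_for_paths : Prop := ∀ (filters : List String) (paths : List String), Dom_filter_for_paths filters paths → Spec_filter_for_paths filters paths (filter_for_paths filters paths)

-- ===== LEMMAS AND PROOFS =====

-- The staged passes compute one combined filter: traversal order does not matter.
theorem pvStaged_eq (filters : List String) (paths : List String) :
    filter_for_paths_alt filters paths
      = paths.filter (fun p => !(pvFilterInPath filters p)) := by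
  induction filters generalizing paths with
  | nil => simp [filter_for_paths_alt, pvFilterInPath]
  | cons f rest ih =>
    show filter_for_paths_alt rest (paths.filter (fun p => !(PySem.Str.isIn f p))) = _
    rw [ih, List.filter_filter]
    apply List.filter_congr
    intro p _
    simp [pvFilterInPath, Bool.and_comm]

-- ===== VERDICT (by name: the statement is the Claim_ definition above) =====
theorem filter_for_paths_spec : Claim_equal_filter_for_paths := by
  intro filters paths _
  unfold Spec_filter_for_paths
  rw [pvStaged_eq]
  unfold filter_for_paths
  by_cases h : filters = []
  · subst h
    simp [pvFilterInPath]
  · rw [if_neg h]
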